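-- pv_equiv track=rewrite | github.com/ValeriiRuchko/Lab1Algo | task_two.py | task_b
-- ===== SOURCE A (Python) =====
-- sizeOfMartix = 5  # size of our two-dimensional matrix
--
-- def task_b(matr):
--     temp = list()
--     operated_arr = [[0 for x in range(sizeOfMartix)] for y in range(sizeOfMartix)]
--     for x in range(0, sizeOfMartix):
--         for y in range(0, sizeOfMartix):
--             temp.append(matr[y][x])
--         temp.sort()
--         r = 0
--         for n in temp:
--             operated_arr[r][x] = n
--             r += 1
--         temp.clear()
--     return operated_arr
-- ===== SOURCE B (Python) =====
-- def task_b(matr):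
--     flat = sorted([(x, matr[y][x]) for x in range(5) for y in range(5)])
--     return [[flat[5 * x + r][1] for x in range(5)] for r in range(5)]
-- ===== Notes on version B (the rewrite author's own statement) =====
-- stated objective: alternative
-- what changed: Instead of five separate per-column sorts scattered back by index, B tags every entry with its column, performs ONE global lexicographic sort of the 25 (column, value) pairs, and reads each output row directly out of the flat sorted list by position.
import Mathlib
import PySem

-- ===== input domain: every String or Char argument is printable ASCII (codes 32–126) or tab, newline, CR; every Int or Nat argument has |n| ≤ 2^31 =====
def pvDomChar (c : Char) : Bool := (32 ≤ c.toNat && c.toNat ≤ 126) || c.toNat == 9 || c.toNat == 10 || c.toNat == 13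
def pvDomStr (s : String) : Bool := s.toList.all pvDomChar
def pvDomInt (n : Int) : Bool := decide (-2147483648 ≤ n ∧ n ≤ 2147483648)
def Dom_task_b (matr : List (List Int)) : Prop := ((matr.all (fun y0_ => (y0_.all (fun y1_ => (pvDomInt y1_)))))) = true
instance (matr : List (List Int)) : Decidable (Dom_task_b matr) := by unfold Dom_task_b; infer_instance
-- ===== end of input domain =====

-- B replaces A's five per-column sorts and scatter-by-index writes with ONE global
-- lexicographic sort of the 25 (column, value) pairs, reading rows off the flat result.

-- ===== PORT A =====
def task_b (matr : List (List Int)) : List (List Int) :=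
  let operated_arr : List (List Int) :=
    (PySem.List.pyRange 0 5 1).map (fun _ => (PySem.List.pyRange 0 5 1).map (fun _ => (0 : Int)))
  (PySem.List.pyRange 0 5 1).foldl (fun acc x =>
    let temp : List Int :=
      (PySem.List.pyRange 0 5 1).foldl
        (fun t y => t ++ [PySem.List.pyGetD (PySem.List.pyGetD matr y []) x 0]) []
    let temp := PySem.List.sorted temp (fun v => v) false
    (temp.foldl (fun (st : List (List Int) × Int) n =>
        (PySem.List.pySetD st.1 st.2
            (PySem.List.pySetD (PySem.List.pyGetD st.1 st.2 []) x n) , st.2 + 1))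
      (acc, (0 : Int))).1) operated_arr

-- ===== PORT B =====
def task_b_alt (matr : List (List Int)) : List (List Int) :=
  let flat : List (Int × Int) :=
    PySem.List.sorted2
      ((PySem.List.pyRange 0 5 1).flatMap (fun x =>
        (PySem.List.pyRange 0 5 1).map (fun y =>
          (x, PySem.List.pyGetD (PySem.List.pyGetD matr y []) x 0))))
      (fun p => p.1) (fun p => p.2) false
  (PySem.List.pyRange 0 5 1).map (fun r =>
    (PySem.List.pyRange 0 5 1).map (fun x =>
      (PySem.List.pyGetD flat (5 * x + r) (0, 0)).2))

-- ===== PRECONDITION & SPEC =====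
-- A indexes matr[y][x] for y,x in range(5): it raises IndexError iff matr has fewer
-- than 5 rows or one of the first 5 rows has fewer than 5 entries; Pre_ excludes exactly that.
def Pre_task_b (matr : List (List Int)) : Prop :=
  5 ≤ matr.length ∧ ∀ row ∈ matr.take 5, 5 ≤ row.length
instance (matr : List (List Int)) : Decidable (Pre_task_b matr) := by unfold Pre_task_b; infer_instance

def pvWitness_task_b : List (List Int) :=
  [[5,4,3,2,1],[1,2,3,4,5],[9,8,7,6,5],[0,0,0,0,0],[2,3,1,5,4]]

def Spec_task_b (matr : List (List Int)) (out : List (List Int)) : Prop := out = task_b_alt matr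
instance (matr : List (List Int)) (out : List (List Int)) : Decidable (Spec_task_b matr out) := by unfold Spec_task_b; infer_instance

-- ===== CLAIM (what is proved, stated in full; the proofs are below) =====
def Claim_equal_task_b : Prop := ∀ (matr : List (List Int)), Dom_task_b matr → Pre_task_b matr → Spec_task_b matr (task_b matr)

-- ===== LEMMAS AND PROOFS =====
lemma gd0 {α : Type} (v0 v1 v2 v3 v4 : α) (t : List α) (d : α) :
    PySem.List.pyGetD (v0::v1::v2::v3::v4::t) 0 d = v0 := by
  simp [PySem.List.pyGetD, PySem.List.pyGet?, PySem.List.pyIdx?]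
  rw [if_pos (by omega)]
  simp

lemma sd0 {α : Type} (v0 v1 v2 v3 v4 : α) (t : List α) (w : α) :
    PySem.List.pySetD (v0::v1::v2::v3::v4::t) 0 w = w::v1::v2::v3::v4::t := by
  simp [PySem.List.pySetD, PySem.List.pySet?, PySem.List.pyIdx?]
  rw [if_pos (by omega)]
  simp

lemma gd1 {α : Type} (v0 v1 v2 v3 v4 : α) (t : List α) (d : α) :
    PySem.List.pyGetD (v0::v1::v2::v3::v4::t) 1 d = v1 := by
  simp [PySem.List.pyGetD, PySem.List.pyGet?, PySem.List.pyIdx?]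
  rw [if_pos (by omega)]
  simp

lemma sd1 {α : Type} (v0 v1 v2 v3 v4 : α) (t : List α) (w : α) :
    PySem.List.pySetD (v0::v1::v2::v3::v4::t) 1 w = v0::w::v2::v3::v4::t := by
  simp [PySem.List.pySetD, PySem.List.pySet?, PySem.List.pyIdx?]
  rw [if_pos (by omega)]
  simp

lemma gd2 {α : Type} (v0 v1 v2 v3 v4 : α) (t : List α) (d : α) :
    PySem.List.pyGetD (v0::v1::v2::v3::v4::t) 2 d = v2 := by
  simp [PySem.List.pyGetD, PySem.List.pyGet?, PySem.List.pyIdx?]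
  rw [if_pos (by omega)]
  simp

lemma sd2 {α : Type} (v0 v1 v2 v3 v4 : α) (t : List α) (w : α) :
    PySem.List.pySetD (v0::v1::v2::v3::v4::t) 2 w = v0::v1::w::v3::v4::t := by
  simp [PySem.List.pySetD, PySem.List.pySet?, PySem.List.pyIdx?]
  rw [if_pos (by omega)]
  simp

lemma gd3 {α : Type} (v0 v1 v2 v3 v4 : α) (t : List α) (d : α) :
    PySem.List.pyGetD (v0::v1::v2::v3::v4::t) 3 d = v3 := by
  simp [PySem.List.pyGetD, PySem.List.pyGet?, PySem.List.pyIdx?]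
  rw [if_pos (by omega)]
  simp

lemma sd3 {α : Type} (v0 v1 v2 v3 v4 : α) (t : List α) (w : α) :
    PySem.List.pySetD (v0::v1::v2::v3::v4::t) 3 w = v0::v1::v2::w::v4::t := by
  simp [PySem.List.pySetD, PySem.List.pySet?, PySem.List.pyIdx?]
  rw [if_pos (by omega)]
  simp

lemma gd4 {α : Type} (v0 v1 v2 v3 v4 : α) (t : List α) (d : α) :
    PySem.List.pyGetD (v0::v1::v2::v3::v4::t) 4 d = v4 := by
  simp [PySem.List.pyGetD, PySem.List.pyGet?, PySem.List.pyIdx?]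
  rw [if_pos (by omega)]
  simp

lemma sd4 {α : Type} (v0 v1 v2 v3 v4 : α) (t : List α) (w : α) :
    PySem.List.pySetD (v0::v1::v2::v3::v4::t) 4 w = v0::v1::v2::v3::w::t := by
  simp [PySem.List.pySetD, PySem.List.pySet?, PySem.List.pyIdx?]
  rw [if_pos (by omega)]
  simp

lemma exists_cons5 (l : List Int) (h : 5 ≤ l.length) :
    ∃ a b c d e t, l = a :: b :: c :: d :: e :: t := by
  rcases l with _ | ⟨a, l⟩; · simp at h
  rcases l with _ | ⟨b, l⟩; · simp at h
  rcases l with _ | ⟨c, l⟩; · simp at h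
  rcases l with _ | ⟨d, l⟩; · simp at h
  rcases l with _ | ⟨e, l⟩; · simp at h
  exact ⟨a, b, c, d, e, l, rfl⟩

lemma exists_rows5 (l : List (List Int)) (h : 5 ≤ l.length) :
    ∃ a b c d e t, l = a :: b :: c :: d :: e :: t := by
  rcases l with _ | ⟨a, l⟩; · simp at h
  rcases l with _ | ⟨b, l⟩; · simp at h
  rcases l with _ | ⟨c, l⟩; · simp at h
  rcases l with _ | ⟨d, l⟩; · simp at h
  rcases l with _ | ⟨e, l⟩; · simp at h
  exact ⟨a, b, c, d, e, l, rfl⟩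

lemma exists_eq5 (l : List Int) (h : l.length = 5) :
    ∃ a b c d e, l = [a, b, c, d, e] := by
  obtain ⟨a, b, c, d, e, t, rfl⟩ := exists_cons5 l (by omega)
  simp at h
  exact ⟨a, b, c, d, e, by simp [h]⟩

-- sorted2 with the pair projections IS sorting by the lexicographic key (Python's tuple order).
lemma sorted2_eq_sorted_lex (xs : List (Int × Int)) :
    PySem.List.sorted2 xs (fun p => p.1) (fun p => p.2) false
      = PySem.List.sorted xs (fun p => toLex p) false := by
  have hb : (fun (a b : Int × Int) =>
        (decide (a.1 < b.1) || (!decide (b.1 < a.1) && decide (a.2 < b.2))))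
      = fun (a b : Int × Int) => decide (toLex a < toLex b) := by
    funext a b
    by_cases h1 : a.1 < b.1 <;> by_cases h2 : b.1 < a.1 <;> by_cases h3 : a.2 < b.2 <;>
      simp [Prod.Lex.lt_iff, h1, h2, h3] <;> omega
  rw [PySem.List.sorted_eq_foldl_insertBy]
  simp only [PySem.List.sorted2, hb, Bool.false_eq_true]
  simp

lemma tag_pairwise (x : Int) (c : List Int) (h : c.Pairwise (· ≤ ·)) :
    (c.map (fun v => (x, v))).Pairwise
      (fun a b : Int × Int => toLex a ≤ toLex b) := by
  rw [List.pairwise_map]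
  refine h.imp ?_
  intro a b hab
  simp [Prod.Lex.le_iff, hab]

-- The global lexicographic sort of the tagged columns is the concatenation of the
-- tagged per-column sorts (stable sort uniqueness via an injective ordered key).
lemma sorted2_blocks (c0 c1 c2 c3 c4 : List Int) :
    PySem.List.sorted2
        (c0.map (fun v => ((0:Int), v)) ++ c1.map (fun v => ((1:Int), v))
          ++ c2.map (fun v => ((2:Int), v)) ++ c3.map (fun v => ((3:Int), v))
          ++ c4.map (fun v => ((4:Int), v)))
        (fun p => p.1) (fun p => p.2) false
      = (PySem.List.sorted c0 (fun v => v) false).map (fun v => ((0:Int), v))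
          ++ (PySem.List.sorted c1 (fun v => v) false).map (fun v => ((1:Int), v))
          ++ (PySem.List.sorted c2 (fun v => v) false).map (fun v => ((2:Int), v))
          ++ (PySem.List.sorted c3 (fun v => v) false).map (fun v => ((3:Int), v))
          ++ (PySem.List.sorted c4 (fun v => v) false).map (fun v => ((4:Int), v)) := by
  rw [sorted2_eq_sorted_lex]
  apply PySem.List.eq_of_perm_of_pairwise_le_of_injective (fun p : Int × Int => toLex p)
    (fun a b h => h)
  · refine (PySem.List.sorted_perm _ _ _).trans ?_
    refine ((((((PySem.List.sorted_perm c0 (fun v => v) false).map _).append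
      ((PySem.List.sorted_perm c1 (fun v => v) false).map _)).append
      ((PySem.List.sorted_perm c2 (fun v => v) false).map _)).append
      ((PySem.List.sorted_perm c3 (fun v => v) false).map _)).append
      ((PySem.List.sorted_perm c4 (fun v => v) false).map _)).symm
  · exact PySem.List.sorted_pairwise _ _
  · have hp : ∀ c : List Int, (PySem.List.sorted c (fun v => v) false).Pairwise (· ≤ ·) :=
      fun c => PySem.List.sorted_pairwise c (fun v => v)
    have hcross : ∀ (x y : Int), x < y → ∀ (c d : List Int),
        ∀ a ∈ c.map (fun v => (x, v)), ∀ b ∈ d.map (fun v => (y, v)),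
          toLex a ≤ toLex b := by
      intro x y hxy c d a ha b hb
      simp at ha hb
      obtain ⟨va, hva⟩ := ha; obtain ⟨vb, hvb⟩ := hb
      simp [← hva.2, ← hvb.2, Prod.Lex.le_iff, hxy]
    refine List.pairwise_append.2 ⟨?_, tag_pairwise 4 _ (hp c4), ?_⟩
    · refine List.pairwise_append.2 ⟨?_, tag_pairwise 3 _ (hp c3), ?_⟩
      · refine List.pairwise_append.2 ⟨?_, tag_pairwise 2 _ (hp c2), ?_⟩
        · refine List.pairwise_append.2 ⟨tag_pairwise 0 _ (hp c0), tag_pairwise 1 _ (hp c1), ?_⟩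
          · exact fun a ha b hb => hcross 0 1 (by norm_num) _ _ a ha b hb
        · intro a ha b hb
          rcases List.mem_append.1 ha with h | h
          · exact hcross 0 2 (by norm_num) _ _ a h b hb
          · exact hcross 1 2 (by norm_num) _ _ a h b hb
      · intro a ha b hb
        rcases List.mem_append.1 ha with h | h
        · rcases List.mem_append.1 h with h' | h'
          · exact hcross 0 3 (by norm_num) _ _ a h' b hb
          · exact hcross 1 3 (by norm_num) _ _ a h' b hb
        · exact hcross 2 3 (by norm_num) _ _ a h b hb
    · intro a ha b hb
      rcases List.mem_append.1 ha with h | h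
      · rcases List.mem_append.1 h with h' | h'
        · rcases List.mem_append.1 h' with h'' | h''
          · exact hcross 0 4 (by norm_num) _ _ a h'' b hb
          · exact hcross 1 4 (by norm_num) _ _ a h'' b hb
        · exact hcross 2 4 (by norm_num) _ _ a h' b hb
      · exact hcross 3 4 (by norm_num) _ _ a h b hb

-- ===== VERDICT (by name: the statement is the Claim_ definition above) =====
theorem task_b_spec : Claim_equal_task_b := by
  intro matr _ hpre
  obtain ⟨hlen, hrows⟩ := hpre
  obtain ⟨r0, r1, r2, r3, r4, rest, rfl⟩ := exists_rows5 matr hlen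
  obtain ⟨a0, a1, a2, a3, a4, t0, rfl⟩ := exists_cons5 r0 (hrows _ (by simp))
  obtain ⟨b0, b1, b2, b3, b4, t1, rfl⟩ := exists_cons5 r1 (hrows _ (by simp))
  obtain ⟨c0, c1, c2, c3, c4, t2, rfl⟩ := exists_cons5 r2 (hrows _ (by simp))
  obtain ⟨d0, d1, d2, d3, d4, t3, rfl⟩ := exists_cons5 r3 (hrows _ (by simp))
  obtain ⟨e0, e1, e2, e3, e4, t4, rfl⟩ := exists_cons5 r4 (hrows _ (by simp))
  obtain ⟨s00, s01, s02, s03, s04, h0⟩ :=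
    exists_eq5 (PySem.List.sorted [a0, b0, c0, d0, e0] (fun v => v) false)
      (by simp [PySem.List.length_sorted])
  obtain ⟨s10, s11, s12, s13, s14, h1⟩ :=
    exists_eq5 (PySem.List.sorted [a1, b1, c1, d1, e1] (fun v => v) false)
      (by simp [PySem.List.length_sorted])
  obtain ⟨s20, s21, s22, s23, s24, h2⟩ :=
    exists_eq5 (PySem.List.sorted [a2, b2, c2, d2, e2] (fun v => v) false)
      (by simp [PySem.List.length_sorted])
  obtain ⟨s30, s31, s32, s33, s34, h3⟩ :=
    exists_eq5 (PySem.List.sorted [a3, b3, c3, d3, e3] (fun v => v) false)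
      (by simp [PySem.List.length_sorted])
  obtain ⟨s40, s41, s42, s43, s44, h4⟩ :=
    exists_eq5 (PySem.List.sorted [a4, b4, c4, d4, e4] (fun v => v) false)
      (by simp [PySem.List.length_sorted])
  show task_b _ = task_b_alt _
  have hr : PySem.List.pyRange 0 5 1 = [0, 1, 2, 3, 4] := by decide
  have hs := sorted2_blocks [a0, b0, c0, d0, e0] [a1, b1, c1, d1, e1]
    [a2, b2, c2, d2, e2] [a3, b3, c3, d3, e3] [a4, b4, c4, d4, e4]
  rw [h0, h1, h2, h3, h4] at hs
  simp only [List.map, List.cons_append, List.nil_append] at hs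
  have hA : task_b
      ((a0::a1::a2::a3::a4::t0) :: (b0::b1::b2::b3::b4::t1) :: (c0::c1::c2::c3::c4::t2)
        :: (d0::d1::d2::d3::d4::t3) :: (e0::e1::e2::e3::e4::t4) :: rest)
      = [[s00, s10, s20, s30, s40], [s01, s11, s21, s31, s41], [s02, s12, s22, s32, s42],
         [s03, s13, s23, s33, s43], [s04, s14, s24, s34, s44]] := by
    norm_num [task_b, hr, gd0, gd1, gd2, gd3, gd4, sd0, sd1, sd2, sd3, sd4,
      h0, h1, h2, h3, h4]
  have hB : task_b_alt
      ((a0::a1::a2::a3::a4::t0) :: (b0::b1::b2::b3::b4::t1) :: (c0::c1::c2::c3::c4::t2)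
        :: (d0::d1::d2::d3::d4::t3) :: (e0::e1::e2::e3::e4::t4) :: rest)
      = [[s00, s10, s20, s30, s40], [s01, s11, s21, s31, s41], [s02, s12, s22, s32, s42],
         [s03, s13, s23, s33, s43], [s04, s14, s24, s34, s44]] := by
    rw [task_b_alt]
    simp only [hr, List.flatMap_cons, List.flatMap_nil, List.map_cons, List.map_nil,
      List.cons_append, List.nil_append, List.append_nil,
      gd0, gd1, gd2, gd3, gd4]
    rw [hs]
    norm_num [PySem.List.pyGetD_ofNat', List.getD]
  rw [hA, hB]
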